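-- pv_equiv track=rewrite | github.com/RR-DSE/pcr-workplan | pcr-workplan/tools.py | GetTableFromDictList
-- ===== SOURCE A (Python) =====
-- def GetTableFromDictList(dSrc, sKeyField):
--   dNewTable = []
--   dNewFieldList = []
--   bFieldListSet = False
--   try:
--     for sKey, dItem in dSrc.items():
--       for dRow in dItem:
--         dNewDict = dict()
--         dNewDict[sKeyField] = sKey
--         if not bFieldListSet:
--           dNewFieldList = list(dRow.keys())
--           bFieldListSet = True
--         for sKey2 in dNewFieldList:
--           dNewDict[sKey2] = dRow[sKey2]
--         dNewTable.append(dNewDict)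
--     dNewFieldList.insert(0,sKeyField)
--   except:
--     raise
--   return (dNewFieldList, dNewTable)
-- ===== SOURCE B (Python) =====
-- def GetTableFromDictList(dSrc, sKeyField):
--   # columnar construction: build each column in its own pass, then transpose
--   pairs = [(sKey, dRow) for sKey, dItem in dSrc.items() for dRow in dItem]
--   fields = []
--   for _, dRow in pairs:
--     fields = list(dRow.keys())
--     break
--   header = [sKeyField] + fields
--   columns = [[sKey for sKey, _ in pairs]] + \
--             [[dRow[f] for _, dRow in pairs] for f in fields]
--   table = [dict(zip(header, vals)) for vals in zip(*columns)]
--   return (header, table)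
-- ===== Notes on version B (the rewrite author's own statement) =====
-- stated objective: alternative
-- what changed: Replaces A's row-wise flagged pass (one dict grown field-by-field per record) by a columnar construction: flatten to (key,row) pairs, build one full column per header field, transpose the columns with zip, and zip each transposed tuple with the header into a row dict.
import Mathlib
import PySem

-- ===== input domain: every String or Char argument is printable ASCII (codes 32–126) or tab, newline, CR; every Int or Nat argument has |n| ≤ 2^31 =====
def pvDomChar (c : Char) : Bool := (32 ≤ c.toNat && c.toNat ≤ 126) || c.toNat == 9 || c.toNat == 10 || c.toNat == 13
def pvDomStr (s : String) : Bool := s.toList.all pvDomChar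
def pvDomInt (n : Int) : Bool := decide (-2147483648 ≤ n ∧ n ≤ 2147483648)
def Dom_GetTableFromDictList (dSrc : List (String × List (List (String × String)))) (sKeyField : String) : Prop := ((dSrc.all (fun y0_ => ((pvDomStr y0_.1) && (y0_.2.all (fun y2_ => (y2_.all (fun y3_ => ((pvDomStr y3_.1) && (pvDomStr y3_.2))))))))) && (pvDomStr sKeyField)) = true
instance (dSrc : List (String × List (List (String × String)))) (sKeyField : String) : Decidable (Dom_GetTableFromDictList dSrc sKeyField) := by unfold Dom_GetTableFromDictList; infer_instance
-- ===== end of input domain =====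

-- B builds the table COLUMN-wise (one full pass per header field, then a transpose) where A builds it
-- row-wise in one flagged pass; objective: alternative algorithm, same cost. Equal return values proved on Pre_.

-- ===== PORT A =====
-- one row of A's inner loop: dNewDict[sKeyField]=sKey, then dNewDict[k]=dRow[k] for k in the field list
-- (dRow[k] is ported as getD with default ""; exact where the key is present, which Pre_ guarantees)
def pvRowA (sKeyField : String) (k : String) (fl : List String) (r : List (String × String)) : List (String × String) :=
  (fl.foldl (fun d f => d.insert f ((PySem.Dict.ofList r).getD f ""))
    (PySem.Dict.empty.insert sKeyField k)).items

-- A's loop body on state (dNewTable, dNewFieldList, bFieldListSet)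
def pvStepA (sKeyField : String)
    (st : List (List (String × String)) × List String × Bool)
    (k : String) (r : List (String × String)) :
    List (List (String × String)) × List String × Bool :=
  let fl' := if st.2.2 then st.2.1 else (PySem.Dict.ofList r).keys
  (st.1 ++ [pvRowA sKeyField k fl' r], fl', true)

def GetTableFromDictList (dSrc : List (String × List (List (String × String)))) (sKeyField : String) : List String × (List (List (String × String))) :=
  let st := dSrc.foldl (fun st p => p.2.foldl (fun st2 r => pvStepA sKeyField st2 p.1 r) st)
    ([], [], false)
  (sKeyField :: st.2.1, st.1)

-- ===== PORT B =====
-- the flat comprehension [(sKey, dRow) for sKey, dItem in dSrc.items() for dRow in dItem]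
def pvPairs (dSrc : List (String × List (List (String × String)))) : List (String × List (String × String)) :=
  dSrc.flatMap (fun p => p.2.map (fun r => (p.1, r)))

-- the header-discovery loop (take the first pair's row keys, break)
def pvFields : List (String × List (String × String)) → List String
  | [] => []
  | q :: _ => (PySem.Dict.ofList q.2).keys

-- zip(*columns): take one head from every column until some column runs out
def pvZipStar (cols : List (List String)) : List (List String) :=
  if cols = [] ∨ cols.any List.isEmpty then []
  else (cols.map (fun c => c.headD "")) :: pvZipStar (cols.map List.tail)
termination_by (cols.headD []).length
decreasing_by
  rename_i h
  cases cols with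
  | nil => simp at h
  | cons c cs =>
    cases c with
    | nil => simp at h
    | cons x xs => simp

def GetTableFromDictList_alt (dSrc : List (String × List (List (String × String)))) (sKeyField : String) : List String × (List (List (String × String))) :=
  let pairs := pvPairs dSrc
  let fields := pvFields pairs
  let header := sKeyField :: fields
  let columns := (pairs.map Prod.fst) ::
    fields.map (fun f => pairs.map (fun q => (PySem.Dict.ofList q.2).getD f ""))
  let table := (pvZipStar columns).map (fun vals => (PySem.Dict.ofList (header.zip vals)).items)
  (header, table)

-- ===== PRECONDITION & SPEC =====
-- Pre_ excludes exactly the inputs where Python A raises KeyError: some row is missing a field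
-- of the first row of the first non-empty item (B raises the same KeyError there).
def Pre_GetTableFromDictList (dSrc : List (String × List (List (String × String)))) (sKeyField : String) : Prop :=
  ∀ r0 ∈ ((dSrc.flatMap Prod.snd).head?.toList), ∀ p ∈ dSrc, ∀ r ∈ p.2,
    ∀ f ∈ r0.map Prod.fst, (PySem.Dict.ofList r).contains f = true
instance (dSrc : List (String × List (List (String × String)))) (sKeyField : String) : Decidable (Pre_GetTableFromDictList dSrc sKeyField) := by unfold Pre_GetTableFromDictList; infer_instance
def pvWitness_GetTableFromDictList : (List (String × List (List (String × String)))) × String :=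
  ([("a", [[("x", "1")], [("x", "2"), ("y", "3")]]), ("b", [[("x", "4")]])], "k")

def Spec_GetTableFromDictList (dSrc : List (String × List (List (String × String)))) (sKeyField : String) (out : List String × (List (List (String × String)))) : Prop := out = GetTableFromDictList_alt dSrc sKeyField
instance (dSrc : List (String × List (List (String × String)))) (sKeyField : String) (out : List String × (List (List (String × String)))) : Decidable (Spec_GetTableFromDictList dSrc sKeyField out) := by unfold Spec_GetTableFromDictList; infer_instance

-- ===== CLAIM (what is proved, stated in full; the proofs are below) =====
def Claim_equal_GetTableFromDictList : Prop := ∀ (dSrc : List (String × List (List (String × String)))) (sKeyField : String), Dom_GetTableFromDictList dSrc sKeyField → Pre_GetTableFromDictList dSrc sKeyField → Spec_GetTableFromDictList dSrc sKeyField (GetTableFromDictList dSrc sKeyField)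

-- ===== LEMMAS AND PROOFS =====

-- A's nested loop is a single fold over the flattened (key, row) pairs
theorem foldl_pairs (kf : String) (dSrc : List (String × List (List (String × String))))
    (init : List (List (String × String)) × List String × Bool) :
    dSrc.foldl (fun st p => p.2.foldl (fun st2 r => pvStepA kf st2 p.1 r) st) init
      = (pvPairs dSrc).foldl (fun st q => pvStepA kf st q.1 q.2) init := by
  induction dSrc generalizing init with
  | nil => simp [pvPairs]
  | cons p rest ih =>
    rw [List.foldl_cons, ih]
    simp [pvPairs, List.foldl_append, List.foldl_map]

-- once the field list is set, A's fold just appends one row per pair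
theorem foldl_step_true (kf : String) (L : List (String × List (String × String)))
    (tbl : List (List (String × String))) (fl : List String) :
    L.foldl (fun st q => pvStepA kf st q.1 q.2) (tbl, fl, true)
      = (tbl ++ L.map (fun q => pvRowA kf q.1 fl q.2), fl, true) := by
  induction L generalizing tbl with
  | nil => simp
  | cons q L ih =>
    have hst : pvStepA kf (tbl, fl, true) q.1 q.2 = (tbl ++ [pvRowA kf q.1 fl q.2], fl, true) := by
      simp [pvStepA]
    rw [List.foldl_cons, hst, ih]
    simp

-- transposing columns that are all maps over the same pair list gives one value vector per pair
theorem pvZipStar_map_cols {P : Type} (funcs : List (P → String)) (pairs : List P)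
    (hne : funcs ≠ []) :
    pvZipStar (funcs.map (fun g => pairs.map g))
      = pairs.map (fun q => funcs.map (fun g => g q)) := by
  induction pairs with
  | nil =>
    rw [pvZipStar]
    cases funcs with
    | nil => exact absurd rfl hne
    | cons g gs => simp
  | cons q rest ih =>
    rw [pvZipStar]
    have h1 : ¬ (funcs.map (fun g => (q :: rest).map g) = [] ∨
        (funcs.map (fun g => (q :: rest).map g)).any List.isEmpty) := by
      rintro (h | h)
      · exact hne (List.map_eq_nil_iff.mp h)
      · simp [List.any_map, Function.comp_def] at h
    rw [if_neg h1]
    simp only [List.map_map, Function.comp_def, List.map_cons, List.headD_cons, List.tail_cons]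
    rw [ih]

-- B's row dict equals A's row dict: dict(zip(header, vals)) is the same fold of inserts
theorem rowB_eq_rowA (kf : String) (fl : List String) (k : String) (r : List (String × String)) :
    (PySem.Dict.ofList ((kf, k) ::
        fl.zip (fl.map (fun f => (PySem.Dict.ofList r).getD f "")))).items
      = pvRowA kf k fl r := by
  have hz : fl.zip (fl.map (fun f => (PySem.Dict.ofList r).getD f ""))
      = fl.map (fun f => (f, (PySem.Dict.ofList r).getD f "")) := by
    induction fl with
    | nil => rfl
    | cons f fs ih => simp [ih]
  rw [hz]
  simp [pvRowA, PySem.Dict.ofList, PySem.Dict.update, List.foldl_map]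

-- ===== VERDICT (by name: the statement is the Claim_ definition above) =====
theorem GetTableFromDictList_spec : Claim_equal_GetTableFromDictList := by
  intro dSrc kf _ _
  unfold Spec_GetTableFromDictList GetTableFromDictList GetTableFromDictList_alt
  dsimp only
  rw [foldl_pairs]
  have hcols : (pvPairs dSrc).map Prod.fst ::
      (pvFields (pvPairs dSrc)).map (fun f => (pvPairs dSrc).map (fun q => (PySem.Dict.ofList q.2).getD f ""))
      = ((fun q : String × List (String × String) => q.1) ::
          (pvFields (pvPairs dSrc)).map (fun f => fun q : String × List (String × String) => (PySem.Dict.ofList q.2).getD f "")).map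
        (fun g => (pvPairs dSrc).map g) := by
    simp [List.map_map, Function.comp]
  rw [hcols, pvZipStar_map_cols _ _ (by simp)]
  cases h : pvPairs dSrc with
  | nil => simp [pvFields]
  | cons q L =>
    have hst : pvStepA kf ([], [], false) q.1 q.2
        = ([pvRowA kf q.1 ((PySem.Dict.ofList q.2).keys) q.2], (PySem.Dict.ofList q.2).keys, true) := by
      simp [pvStepA, pvRowA]
    simp only [List.foldl_cons, hst, foldl_step_true]
    simp [pvFields, Function.comp_def, rowB_eq_rowA]
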